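-- pv_equiv track=rewrite | github.com/xlsynth/bedrock-rtl | ecc/scripts/hsiao_secded.py | min_column_weight
-- ===== SOURCE A (Python) =====
-- import math
--
-- def num_codeword_bits(message_bits: int, parity_bits: int) -> int:
--     """Calculate the total number of bits in a codeword for a Hsiao SECDED code with the given message length and parity length in bits."""
--     return message_bits + parity_bits
--
-- def uint_to_bit_vector(number: int, bit_length: int) -> list:
--     """Convert an unsigned integer to a vector of bits with a specified length."""
--     if number < 0:
--         raise ValueError("Number must be non-negative.")
--     binary_str = format(number, f"0{bit_length}b")
--     bit_vector = [int(bit) for bit in binary_str]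
--     return bit_vector
--
-- def min_column_weight(message_bits: int, parity_bits: int) -> int:
--     """Returns the smallest odd column weight that can be used to construct the parity-check matrix."""
--     codeword_bits = num_codeword_bits(message_bits, parity_bits)
--     for i in range(1, 2**parity_bits, 2):
--         bitvec = uint_to_bit_vector(i, parity_bits)
--         weight = sum(bitvec)
--         if weight % 2 == 1:
--             num_ways = math.comb(parity_bits, weight)
--             if num_ways >= message_bits:
--                 return weight
--     raise ValueError("No valid column weight found!")
-- ===== SOURCE B (Python) =====
-- def min_column_weight(message_bits: int, parity_bits: int) -> int:
--     """Returns the smallest odd column weight that can be used to construct the parity-check matrix."""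
--     # Walk odd weights k = 1, 3, 5, ... maintaining c = comb(parity_bits, k) incrementally.
--     k = 1
--     c = parity_bits  # comb(parity_bits, 1)
--     while k <= parity_bits:
--         if c >= message_bits:
--             return k
--         c = c * (parity_bits - k) * (parity_bits - k - 1) // ((k + 1) * (k + 2))
--         k += 2
--     raise ValueError("No valid column weight found!")
-- ===== Notes on version B (the rewrite author's own statement) =====
-- stated objective: faster
-- what changed: Replaces the enumeration of all odd integers below 2**parity_bits (formatting each to a bit string and popcounting it) by a single pass over odd weights k = 1,3,5,... that maintains the binomial coefficient comb(parity_bits, k) incrementally by multiplication/exact division.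
import Mathlib
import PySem

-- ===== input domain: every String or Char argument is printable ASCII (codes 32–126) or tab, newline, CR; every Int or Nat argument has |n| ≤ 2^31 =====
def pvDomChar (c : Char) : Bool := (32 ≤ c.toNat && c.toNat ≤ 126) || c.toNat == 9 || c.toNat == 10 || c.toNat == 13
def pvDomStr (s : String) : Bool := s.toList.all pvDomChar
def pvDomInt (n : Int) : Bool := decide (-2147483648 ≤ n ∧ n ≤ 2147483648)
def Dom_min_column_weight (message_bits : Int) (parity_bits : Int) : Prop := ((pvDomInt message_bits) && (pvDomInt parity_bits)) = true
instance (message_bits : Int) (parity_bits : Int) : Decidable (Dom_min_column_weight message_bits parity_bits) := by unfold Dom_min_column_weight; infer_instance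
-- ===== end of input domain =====

-- B replaces A's scan over all odd integers below 2**parity_bits (popcounting each) by a single
-- walk over odd weights k = 1,3,5,… maintaining comb(parity_bits,k) incrementally; measurably faster.

-- ===== PORT A =====
def num_codeword_bits (message_bits : Int) (parity_bits : Int) : Int :=
  message_bits + parity_bits

-- MSB-first binary digits of n (empty for 0); used to port format(number, f"0{bit_length}b")
-- (fuel-based structural recursion so the kernel can evaluate it; fuel n always suffices)
def binDigitsAux : Nat → Nat → List Int
  | 0, _ => []
  | fuel + 1, n => if n = 0 then [] else binDigitsAux fuel (n / 2) ++ [((n % 2 : Nat) : Int)]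

def binDigits (n : Nat) : List Int := binDigitsAux n n

def uint_to_bit_vector (number : Int) (bit_length : Int) : List Int :=
  if number < 0 then []  -- Python raises ValueError here; A only calls this with number ≥ 1
  else
    -- format(number, f"0{bit_length}b"): binary digits of number, left-padded with zeros
    let ds : List Int := if number = 0 then [0] else binDigits number.toNat
    List.replicate (bit_length - (ds.length : Int)).toNat 0 ++ ds

-- the `for i in range(1, 2**parity_bits, 2)` loop with its early return; the fuel below is the
-- length of that range, 2**parity_bits // 2, capped at 2^66/2 so it stays representable: on the
-- |int| ≤ 2^31 domain Dom_ this is exact, because whenever the loop returns it does so within the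
-- first 2^65 iterations (the returned weight is ≤ 33 once parity_bits ≥ 67, see the proofs).
-- Fuel exhaustion = loop exhaustion (Python's `raise ValueError`, excluded by Pre_; port returns 0)
def aLoop (message_bits : Int) (parity_bits : Int) : Int → Nat → Int
  | _, 0 => 0
  | i, fuel + 1 =>
      let bitvec := uint_to_bit_vector i parity_bits
      -- sum(bitvec), as a left fold so long bit vectors evaluate without deep recursion
      let weight := bitvec.foldl (· + ·) 0
      if PySem.Int.mod weight 2 = 1 then
        -- math.comb(parity_bits, weight), in the evaluable falling-factorial form
        -- (equal to Nat.choose: Nat.choose_eq_descFactorial_div_factorial)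
        if ((parity_bits.toNat.descFactorial weight.toNat / (weight.toNat).factorial : Nat) : Int)
            ≥ message_bits then weight
        else aLoop message_bits parity_bits (i + 2) fuel
      else aLoop message_bits parity_bits (i + 2) fuel

-- for parity_bits < 0 Python's 2**parity_bits is a float and range raises TypeError; that is
-- excluded by Pre_ (the port's empty fuel returns 0 there).
def min_column_weight (message_bits : Int) (parity_bits : Int) : Int :=
  let _codeword_bits := num_codeword_bits message_bits parity_bits
  aLoop message_bits parity_bits 1 (2 ^ min parity_bits.toNat 66 / 2)

-- ===== PORT B =====
-- the while-loop of Source B; returns 0 on the `raise ValueError` path (excluded by Pre_).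
-- Fuel-based structural recursion so the kernel can evaluate it; the loop runs at most
-- ceil(parity_bits / 2) ≤ parity_bits.toNat times, so the supplied fuel never runs out
-- before the `k ≤ parity_bits` guard ends the loop (fuel 0 returns the same ValueError-path 0).
def altGo (message_bits : Int) (parity_bits : Int) : Int → Int → Nat → Int
  | _, _, 0 => 0
  | k, c, fuel + 1 =>
      if k ≤ parity_bits then
        if c ≥ message_bits then k
        else altGo message_bits parity_bits (k + 2)
          (PySem.Int.floordiv (c * (parity_bits - k) * (parity_bits - k - 1)) ((k + 1) * (k + 2)))
          fuel
      else 0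

def min_column_weight_alt (message_bits : Int) (parity_bits : Int) : Int :=
  altGo message_bits parity_bits 1 parity_bits (parity_bits.toNat + 1)

-- ===== PRECONDITION & SPEC =====
-- Pre_ = exactly the inputs (inside Dom_) on which A returns: parity_bits ≥ 1 (else TypeError /
-- empty range → ValueError) and some odd column weight k ≤ parity_bits has comb(parity_bits, k)
-- ≥ message_bits (else A's loop ends in `raise ValueError`).  The bounded form is exact on Dom_:
-- for parity_bits ≤ 34 it is the check verbatim, and for parity_bits ≥ 35 the odd weight 17 has
-- comb(parity_bits, 17) ≥ comb(35, 17) > 2^31 ≥ message_bits (Dom_ bound), so A always returns.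
def Pre_min_column_weight (message_bits : Int) (parity_bits : Int) : Prop :=
  1 ≤ parity_bits ∧ (35 ≤ parity_bits ∨ ∃ k : Nat, k ≤ min parity_bits.toNat 34 ∧ k % 2 = 1 ∧
    message_bits ≤ ((min parity_bits.toNat 34).choose k : Int))
instance (message_bits : Int) (parity_bits : Int) : Decidable (Pre_min_column_weight message_bits parity_bits) := by unfold Pre_min_column_weight; infer_instance

def pvWitness_min_column_weight : Int × Int := (3, 3)

def Spec_min_column_weight (message_bits : Int) (parity_bits : Int) (out : Int) : Prop := out = min_column_weight_alt message_bits parity_bits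
instance (message_bits : Int) (parity_bits : Int) (out : Int) : Decidable (Spec_min_column_weight message_bits parity_bits out) := by unfold Spec_min_column_weight; infer_instance

-- ===== CLAIM (what is proved, stated in full; the proofs are below) =====
def Claim_equal_min_column_weight : Prop := ∀ (message_bits : Int) (parity_bits : Int), Dom_min_column_weight message_bits parity_bits → Pre_min_column_weight message_bits parity_bits → Spec_min_column_weight message_bits parity_bits (min_column_weight message_bits parity_bits)

-- ===== LEMMAS AND PROOFS =====

-- popcount, the value A's per-integer bit-vector sum computes
def pc (n : Nat) : Nat :=
  if n = 0 then 0 else pc (n / 2) + n % 2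
decreasing_by omega

theorem binDigitsAux_sum : ∀ fuel n, n ≤ fuel → (binDigitsAux fuel n).sum = (pc n : Int) := by
  intro fuel
  induction fuel with
  | zero =>
    intro n hn
    have : n = 0 := by omega
    subst this
    rw [pc]; simp [binDigitsAux]
  | succ fuel ih =>
    intro n hn
    rw [binDigitsAux, pc]
    by_cases h : n = 0
    · simp [h]
    · simp only [h, if_false, List.sum_append, List.sum_cons, List.sum_nil]
      rw [ih (n / 2) (by omega)]
      push_cast
      ring

theorem binDigits_sum (n : Nat) : (binDigits n).sum = (pc n : Int) :=
  binDigitsAux_sum n n le_rfl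

theorem pc_two_pow_sub_one : ∀ k, pc (2 ^ k - 1) = k := by
  intro k
  induction k with
  | zero => rw [pc]; simp
  | succ k ih =>
    have h1 : 1 ≤ 2 ^ k := Nat.one_le_two_pow
    have h : 2 ^ (k + 1) - 1 = 2 * (2 ^ k - 1) + 1 := by rw [pow_succ]; omega
    rw [h, pc]
    have h2 : ¬(2 * (2 ^ k - 1) + 1 = 0) := by omega
    have h3 : (2 * (2 ^ k - 1) + 1) / 2 = 2 ^ k - 1 := by omega
    have h4 : (2 * (2 ^ k - 1) + 1) % 2 = 1 := by omega
    rw [if_neg h2, h3, h4, ih]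

theorem two_pow_pc_le : ∀ n, 2 ^ pc n ≤ n + 1 := by
  intro n
  induction n using Nat.strong_induction_on with
  | _ n ih =>
    rw [pc]
    by_cases h : n = 0
    · simp [h]
    · rw [if_neg h]
      have hq := ih (n / 2) (by omega)
      rcases Nat.mod_two_eq_zero_or_one n with h2 | h2 <;> rw [h2]
      · have : 2 ^ (pc (n / 2) + 0) = 2 ^ pc (n / 2) := by ring
        rw [this]; omega
      · rw [pow_succ]; omega

theorem sum_uint_to_bit_vector (i bl : Int) (hi : 1 ≤ i) :
    (uint_to_bit_vector i bl).foldl (· + ·) 0 = (pc i.toNat : Int) := by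
  rw [← List.sum_eq_foldl]
  rw [uint_to_bit_vector, if_neg (by omega)]
  simp only [if_neg (show ¬ i = 0 by omega)]
  rw [List.sum_append, binDigits_sum]
  simp [List.sum_replicate]

-- A's loop, entered at odd i ≤ 2^K - 1 with enough fuel to reach 2^K - 1, returns K
theorem aLoop_run (m p : Int) (K : Nat)
    (hK1 : K % 2 = 1) (hKc : m ≤ (p.toNat.choose K : Int))
    (hmin : ∀ j < K, ¬(j % 2 = 1 ∧ m ≤ (p.toNat.choose j : Int))) :
    ∀ (fuel n : Nat), n % 2 = 1 → n ≤ 2 ^ K - 1 → 2 ^ K + 1 ≤ n + 2 * fuel →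
      aLoop m p ((n : Nat) : Int) fuel = (K : Int) := by
  have hK1' : 1 ≤ K := by omega
  have ht : (2 : Nat) ^ K = 2 * 2 ^ (K - 1) := by
    rw [← pow_succ']; congr 1; omega
  have h2K : 2 ≤ 2 ^ K := by
    have : 1 ≤ (2 : Nat) ^ (K - 1) := Nat.one_le_two_pow
    omega
  intro fuel
  induction fuel with
  | zero => intro n h1 h2 h3; omega
  | succ fuel ih =>
    intro n h1 h2 h3
    have hn1 : (1 : Int) ≤ ((n : Nat) : Int) := by omega
    show (if PySem.Int.mod ((uint_to_bit_vector ((n : Nat) : Int) p).foldl (· + ·) 0) 2 = 1 then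
            if ((p.toNat.descFactorial ((uint_to_bit_vector ((n : Nat) : Int) p).foldl (· + ·) 0).toNat /
                  (((uint_to_bit_vector ((n : Nat) : Int) p).foldl (· + ·) 0).toNat).factorial : Nat) : Int)
                ≥ m then
              (uint_to_bit_vector ((n : Nat) : Int) p).foldl (· + ·) 0
            else aLoop m p (((n : Nat) : Int) + 2) fuel
          else aLoop m p (((n : Nat) : Int) + 2) fuel) = (K : Int)
    rw [sum_uint_to_bit_vector _ _ hn1]
    simp only [← Nat.choose_eq_descFactorial_div_factorial]
    simp only [Int.toNat_natCast]
    by_cases hEnd : n = 2 ^ K - 1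
    · subst hEnd
      rw [pc_two_pow_sub_one]
      rw [if_pos (by rw [PySem.Int.mod_eq_emod_of_pos (by norm_num)]; omega), if_pos hKc]
    · have hlt : n < 2 ^ K - 1 := by omega
      have hpc : pc n < K := by
        have hle := two_pow_pc_le n
        have : (2 : Nat) ^ pc n < 2 ^ K := by omega
        exact (Nat.pow_lt_pow_iff_right (by norm_num)).mp this
      have hrec : aLoop m p (((n : Nat) : Int) + 2) fuel = (K : Int) := by
        have hcast : (((n : Nat) : Int) + 2) = (((n + 2 : Nat) : Nat) : Int) := by push_cast; ring
        rw [hcast]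
        exact ih (n + 2) (by omega) (by omega) (by omega)
      by_cases hodd : pc n % 2 = 1
      · have hc : ¬ ((p.toNat.choose (pc n) : Int) ≥ m) := fun hc => hmin (pc n) hpc ⟨hodd, hc⟩
        rw [if_pos (by rw [PySem.Int.mod_eq_emod_of_pos (by norm_num)]; omega), if_neg hc, hrec]
      · rw [if_neg (by rw [PySem.Int.mod_eq_emod_of_pos (by norm_num)]; omega), hrec]

-- A returns the least odd K with comb(parity_bits, K) ≥ message_bits
theorem A_side (m p : Int) (K : Nat)
    (hK1 : K % 2 = 1) (hK66 : K ≤ min p.toNat 66) (hKc : m ≤ (p.toNat.choose K : Int))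
    (hmin : ∀ j < K, ¬(j % 2 = 1 ∧ m ≤ (p.toNat.choose j : Int))) :
    min_column_weight m p = (K : Int) := by
  have hK1' : 1 ≤ K := by omega
  have h2K : 2 ≤ 2 ^ K := by
    have h0 : (2 : Nat) ^ K = 2 * 2 ^ (K - 1) := by rw [← pow_succ']; congr 1; omega
    have : 1 ≤ (2 : Nat) ^ (K - 1) := Nat.one_le_two_pow
    omega
  have htP : (2 : Nat) ^ min p.toNat 66 = 2 * 2 ^ (min p.toNat 66 - 1) := by
    rw [← pow_succ']; congr 1; omega
  have hKP : (2 : Nat) ^ K ≤ 2 ^ min p.toNat 66 := Nat.pow_le_pow_right (by norm_num) hK66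
  have hfuel2 : 2 * (2 ^ min p.toNat 66 / 2) = 2 ^ min p.toNat 66 := by omega
  have h := aLoop_run m p K hK1 hKc hmin (2 ^ min p.toNat 66 / 2) 1 (by norm_num) (by omega)
    (by omega)
  show aLoop m p 1 (2 ^ min p.toNat 66 / 2) = (K : Int)
  exact_mod_cast h

-- B's loop, entered at odd k ≤ K with c = comb(parity_bits, k) and enough fuel, stops exactly at K
theorem altGo_run (m p : Int) (K : Nat) (hPp : 1 ≤ p)
    (hK1 : K % 2 = 1) (hKle : K ≤ p.toNat) (hKc : m ≤ (p.toNat.choose K : Int))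
    (hmin : ∀ j < K, ¬(j % 2 = 1 ∧ m ≤ (p.toNat.choose j : Int))) :
    ∀ fuel k, k % 2 = 1 → k ≤ K → K + 1 ≤ k + 2 * fuel →
      altGo m p (k : Int) ((p.toNat.choose k : Nat) : Int) fuel = (K : Int) := by
  intro fuel
  induction fuel with
  | zero => intro k h1 h2 h3; omega
  | succ fuel ih =>
    intro k hk1 hkK hfuel
    have hP : (p.toNat : Int) = p := Int.toNat_of_nonneg (by omega)
    have hkp : (k : Int) ≤ p := by omega
    show (if (k : Int) ≤ p then
            if ((p.toNat.choose k : Nat) : Int) ≥ m then (k : Int)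
            else altGo m p ((k : Int) + 2)
              (PySem.Int.floordiv (((p.toNat.choose k : Nat) : Int) * (p - (k : Int)) *
                (p - (k : Int) - 1)) (((k : Int) + 1) * ((k : Int) + 2))) fuel
          else 0) = (K : Int)
    rw [if_pos hkp]
    by_cases hc : ((p.toNat.choose k : Nat) : Int) ≥ m
    · rw [if_pos hc]
      have hkK' : K ≤ k := by
        by_contra hlt
        exact hmin k (by omega) ⟨hk1, hc⟩
      have : k = K := by omega
      rw [this]
    · rw [if_neg hc]
      have hkne : k ≠ K := by rintro rfl; exact hc hKc
      have hk2 : k + 2 ≤ K := by omega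
      have e1 := Nat.choose_succ_right_eq p.toNat k
      have e2 := Nat.choose_succ_right_eq p.toNat (k + 1)
      have hnat : p.toNat.choose k * (p.toNat - k) * (p.toNat - k - 1) =
          p.toNat.choose (k + 2) * ((k + 1) * (k + 2)) := by
        calc p.toNat.choose k * (p.toNat - k) * (p.toNat - k - 1)
            = p.toNat.choose (k + 1) * (k + 1) * (p.toNat - k - 1) := by rw [← e1]
          _ = p.toNat.choose (k + 1) * (p.toNat - (k + 1)) * (k + 1) := by
              rw [Nat.sub_sub]; ring
          _ = p.toNat.choose (k + 2) * (k + 2) * (k + 1) := by rw [← e2]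
          _ = p.toNat.choose (k + 2) * ((k + 1) * (k + 2)) := by ring
      have hsub1 : p - (k : Int) = ((p.toNat - k : Nat) : Int) := by omega
      have hsub2 : p - (k : Int) - 1 = ((p.toNat - k - 1 : Nat) : Int) := by omega
      have hnum : ((p.toNat.choose k : Nat) : Int) * (p - (k : Int)) * (p - (k : Int) - 1) =
          ((p.toNat.choose (k + 2) : Nat) : Int) * (((k : Int) + 1) * ((k : Int) + 2)) := by
        rw [hsub2, hsub1]
        exact_mod_cast hnat
      have hdpos : (0 : Int) < ((k : Int) + 1) * ((k : Int) + 2) := by positivity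
      rw [hnum, PySem.Int.floordiv_eq_ediv_of_pos hdpos,
        Int.mul_ediv_cancel _ (ne_of_gt hdpos)]
      have h := ih (k + 2) (by omega) hk2 (by omega)
      push_cast at h ⊢
      exact h

theorem B_side (m p : Int) (K : Nat) (hp : 1 ≤ p)
    (hK1 : K % 2 = 1) (hKle : K ≤ p.toNat) (hKc : m ≤ (p.toNat.choose K : Int))
    (hmin : ∀ j < K, ¬(j % 2 = 1 ∧ m ≤ (p.toNat.choose j : Int))) :
    min_column_weight_alt m p = (K : Int) := by
  have hc1 : ((p.toNat.choose 1 : Nat) : Int) = p := by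
    rw [Nat.choose_one_right]; exact Int.toNat_of_nonneg (by omega)
  have hK1' : 1 ≤ K := by omega
  have h := altGo_run m p K hp hK1 hKle hKc hmin (p.toNat + 1) 1 (by norm_num) hK1' (by omega)
  rw [hc1] at h
  show altGo m p 1 p (p.toNat + 1) = (K : Int)
  exact_mod_cast h

-- ===== VERDICT (by name: the statement is the Claim_ definition above) =====
theorem min_column_weight_spec : Claim_equal_min_column_weight := by
  intro m p hdom hpre
  unfold Spec_min_column_weight
  obtain ⟨hp, hrest⟩ := hpre
  have hm : m ≤ 2147483648 := by
    unfold Dom_min_column_weight pvDomInt at hdom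
    simp only [Bool.and_eq_true, decide_eq_true_eq] at hdom
    exact hdom.1.2
  have hpre' : ∃ k0 : Nat, k0 ≤ p.toNat ∧ k0 % 2 = 1 ∧ m ≤ (p.toNat.choose k0 : Int) := by
    rcases hrest with h35 | ⟨k, hkle, hkodd, hkc⟩
    · refine ⟨17, by omega, by norm_num, ?_⟩
      have h1 : (2147483649 : Nat) ≤ Nat.choose 35 17 := by decide
      have h2 : Nat.choose 35 17 ≤ Nat.choose p.toNat 17 :=
        Nat.choose_le_choose 17 (by omega)
      omega
    · have hmin : min p.toNat 34 ≤ p.toNat := min_le_left _ _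
      refine ⟨k, by omega, hkodd, ?_⟩
      have := Nat.choose_le_choose k hmin
      omega
  obtain ⟨k0, hk0le, hk0odd, hk0c⟩ := hpre'
  have hQ : ∃ k : Nat, k % 2 = 1 ∧ m ≤ (p.toNat.choose k : Int) := ⟨k0, hk0odd, hk0c⟩
  have hspec := Nat.find_spec hQ
  have hmin : ∀ j < Nat.find hQ, ¬(j % 2 = 1 ∧ m ≤ (p.toNat.choose j : Int)) :=
    fun j hj => Nat.find_min hQ hj
  have hKle : Nat.find hQ ≤ p.toNat := le_trans (Nat.find_min' hQ ⟨hk0odd, hk0c⟩) hk0le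
  have hK66 : Nat.find hQ ≤ min p.toNat 66 := by
    by_cases hle : p.toNat ≤ 66
    · omega
    · have h33 : m ≤ (p.toNat.choose 33 : Int) := by
        have h1 : (2147483649 : Nat) ≤ Nat.choose 67 33 := by decide
        have h2 := Nat.choose_le_choose 33 (show 67 ≤ p.toNat by omega)
        omega
      have := Nat.find_min' hQ ⟨(by norm_num : 33 % 2 = 1), h33⟩
      omega
  rw [A_side m p (Nat.find hQ) hspec.1 hK66 hspec.2 hmin,
    B_side m p (Nat.find hQ) hp hspec.1 hKle hspec.2 hmin]
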